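-- pv_equiv track=rewrite | github.com/Arban19/Codewars | count_correct_characters.py | count_correct_characters
-- ===== SOURCE A (Python) =====
-- def count_correct_characters(correct,guess):
--     sum = 0
--     if len(correct) != len(guess):
--         raise ValueError
--     else:
--         for ind, ele in enumerate(correct):
--             for dex, ment in enumerate(guess):
--                 if ment == ele and dex == ind:
--                     sum += 1
--         return sum
-- ===== SOURCE B (Python) =====
-- def count_correct_characters(correct, guess):
--     if len(correct) != len(guess):
--         raise ValueError
--     count = 0
--     for c, g in zip(correct, guess):
--         if c == g:
--             count += 1
--     return count
-- ===== Notes on version B (the rewrite author's own statement) =====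
-- stated objective: faster
-- what changed: Replaced the nested double loop over enumerate(correct) x enumerate(guess) by a single linear pass over zip(correct, guess) that counts aligned equal characters.
import Mathlib
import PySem

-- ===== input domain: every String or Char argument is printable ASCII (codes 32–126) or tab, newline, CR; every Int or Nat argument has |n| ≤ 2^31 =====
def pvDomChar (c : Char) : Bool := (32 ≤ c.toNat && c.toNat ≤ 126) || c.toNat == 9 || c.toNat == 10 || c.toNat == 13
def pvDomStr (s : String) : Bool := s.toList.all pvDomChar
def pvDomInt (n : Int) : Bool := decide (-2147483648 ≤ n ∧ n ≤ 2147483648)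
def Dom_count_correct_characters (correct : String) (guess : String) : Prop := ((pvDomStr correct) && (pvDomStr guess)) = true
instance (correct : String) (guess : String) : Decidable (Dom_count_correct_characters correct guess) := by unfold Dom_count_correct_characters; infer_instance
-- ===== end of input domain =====

-- B replaces A's nested O(n^2) enumerate x enumerate scan by one linear pass over zip(correct, guess).


-- ===== PORT A =====
-- nested loops: for ind, ele in enumerate(correct): for dex, ment in enumerate(guess): …
def count_correct_characters (correct : String) (guess : String) : Int :=
  (PySem.List.enumerate correct.toList 0).foldl (fun sum p =>
    (PySem.List.enumerate guess.toList 0).foldl (fun sum2 q =>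
      if q.2 == p.2 && q.1 == p.1 then sum2 + 1 else sum2) sum) 0

-- ===== PORT B =====
-- single pass over zip(correct, guess)
def count_correct_characters_alt (correct : String) (guess : String) : Int :=
  (correct.toList.zip guess.toList).foldl (fun count p =>
    if p.1 == p.2 then count + 1 else count) 0

-- ===== PRECONDITION & SPEC =====
-- Python A raises ValueError when the strings have different lengths; Pre_ excludes exactly that.
def Pre_count_correct_characters (correct : String) (guess : String) : Prop :=
  correct.length = guess.length
instance (correct : String) (guess : String) : Decidable (Pre_count_correct_characters correct guess) := by unfold Pre_count_correct_characters; infer_instance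

def pvWitness_count_correct_characters : String × String := ("cat", "car")

def Spec_count_correct_characters (correct : String) (guess : String) (out : Int) : Prop := out = count_correct_characters_alt correct guess
instance (correct : String) (guess : String) (out : Int) : Decidable (Spec_count_correct_characters correct guess out) := by unfold Spec_count_correct_characters; infer_instance

-- ===== CLAIM (what is proved, stated in full; the proofs are below) =====
def Claim_equal_count_correct_characters : Prop := ∀ (correct : String) (guess : String), Dom_count_correct_characters correct guess → Pre_count_correct_characters correct guess → Spec_count_correct_characters correct guess (count_correct_characters correct guess)

-- ===== LEMMAS AND PROOFS =====

-- indicator: 1 if position j of zs holds c, else 0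
def innerInd (zs : List Char) (j : Int) (c : Char) : Int :=
  if 0 ≤ j ∧ zs[j.toNat]? = some c then 1 else 0

theorem innerInd_cons (z : Char) (zs : List Char) (j : Int) (c : Char) :
    innerInd (z :: zs) j c = if j = 0 then (if z = c then 1 else 0) else innerInd zs (j - 1) c := by
  unfold innerInd
  rcases eq_or_ne j 0 with rfl | hj
  · simp
  · by_cases h0 : 0 ≤ j
    · have h2 : j.toNat = (j - 1).toNat + 1 := by omega
      rw [h2, List.getElem?_cons_succ]
      have h1 : (1:Int) ≤ j := by omega
      simp [hj, h0, h1]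
    · rw [if_neg hj, if_neg (fun h => h0 h.1),
        if_neg (fun h => absurd h.1 (by omega : ¬ (0:Int) ≤ j - 1))]

theorem innerInd_neg (zs : List Char) (j : Int) (c : Char) (h : j < 0) :
    innerInd zs j c = 0 := by
  unfold innerInd
  rw [if_neg (fun hc => absurd hc.1 (by omega : ¬ (0:Int) ≤ j))]

-- the inner loop of A adds exactly innerInd
theorem inner_fold (zs : List Char) (t j : Int) (c : Char) (s : Int) :
    (PySem.List.enumerate zs t).foldl (fun sum2 q =>
        if q.2 == c && q.1 == j then sum2 + 1 else sum2) s
      = s + innerInd zs (j - t) c := by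
  induction zs generalizing t s with
  | nil => simp [innerInd, PySem.List.enumerate_nil]
  | cons z zs ih =>
    rw [PySem.List.enumerate_cons, List.foldl_cons, ih, innerInd_cons]
    rcases eq_or_ne t j with rfl | ht
    · have h1 : t - (t + 1) = -1 := by omega
      have h2 : innerInd zs (-1) c = 0 := innerInd_neg zs (-1) c (by omega)
      rcases eq_or_ne z c with rfl | hz
      · simp [h1, h2]
      · simp [h1, h2, hz]
    · have hjt : j - t ≠ 0 := by omega
      have hne : ¬ (t == j) = true := by simpa using ht
      have hsh : j - (t + 1) = j - t - 1 := by omega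
      simp [hne, hjt, hsh]

theorem innerInd_append_self (pre ys : List Char) (x : Char) :
    innerInd (pre ++ ys) (pre.length : Int) x
      = match ys with
        | [] => 0
        | y :: _ => if y = x then 1 else 0 := by
  unfold innerInd
  cases ys with
  | nil => simp
  | cons y ys =>
    rcases eq_or_ne y x with rfl | hy
    · simp
    · simp [hy]

-- the outer loop of A computes B's zip count, shifted by the prefix pre of guess already consumed
theorem outer_fold (xs : List Char) (ys pre : List Char) (s : Int)
    (hle : xs.length ≤ ys.length) :
    (PySem.List.enumerate xs (pre.length : Int)).foldl (fun sum p =>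
        (PySem.List.enumerate (pre ++ ys) 0).foldl (fun sum2 q =>
          if q.2 == p.2 && q.1 == p.1 then sum2 + 1 else sum2) sum) s
      = (xs.zip ys).foldl (fun count p => if p.1 == p.2 then count + 1 else count) s := by
  induction xs generalizing ys pre s with
  | nil => simp [PySem.List.enumerate_nil]
  | cons x xs ih =>
    cases ys with
    | nil => simp at hle
    | cons y ys =>
      rw [PySem.List.enumerate_cons, List.foldl_cons, inner_fold, List.zip_cons_cons,
        List.foldl_cons]
      have harith : ((pre.length : Int)) - 0 = ((pre.length : Int)) := by omega
      rw [harith, innerInd_append_self]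
      have hstep : (pre.length : Int) + 1 = (((pre ++ [y]).length : Nat) : Int) := by
        simp
      have hassoc : pre ++ y :: ys = (pre ++ [y]) ++ ys := by simp
      rw [hstep, hassoc, ih ys (pre ++ [y]) _ (by simpa using Nat.le_of_succ_le_succ hle)]
      rcases eq_or_ne y x with rfl | hy
      · simp
      · have hxy : ¬ (x = y) := fun h => hy h.symm
        simp [hy, hxy]

-- ===== VERDICT (by name: the statement is the Claim_ definition above) =====
theorem count_correct_characters_spec : Claim_equal_count_correct_characters := by
  intro correct guess _ hpre
  unfold Spec_count_correct_characters count_correct_characters count_correct_characters_alt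
  unfold Pre_count_correct_characters at hpre
  rw [← String.length_toList, ← String.length_toList] at hpre
  have hlen : correct.toList.length ≤ guess.toList.length := le_of_eq hpre
  have := outer_fold correct.toList guess.toList [] 0 hlen
  simpa using this
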